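-- pv_equiv track=rewrite | github.com/Quandela/Perceval | perceval/converters/converter_utils.py | _find_max_ralph_pairs
-- ===== SOURCE A (Python) =====
-- from itertools import combinations
--
-- def _is_cyclic_util(v: int, visited: list, parent: int, adj_list: list) -> bool:
--     visited[v] = True
--     for i in adj_list[v]:
--         if not visited[i]:
--             if _is_cyclic_util(i, visited, v, adj_list):
--                 return True
--         elif parent != i:
--             return True
--     return False
--
-- def _is_cyclic(adj_list: list, cnot_node_count: int) -> bool:
--     # returns True if a cyclic pair is found
--     visited = [False] * cnot_node_count
--     for i in range(cnot_node_count):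
--         if not visited[i]:
--             if _is_cyclic_util(i, visited, -1, adj_list):
--                 return True
--     return False
--
-- def _find_max_ralph_pairs(pairs) -> list:
--     # finds largest set of acyclic edges -> Ralph CNOTs can be added to these positions
--     nodes = set()  # create a set of all positions (mode indices) at which CNOT exists
--     for pair in pairs:
--         nodes.update(pair)
--
--     node_map = {node: idx for idx, node in enumerate(nodes)}
--     cnot_node_count = len(nodes)  # num of cnots
--
--     max_subset = []  # list of pairs of acyclic combinations of modes
--
--     # Check all possible subsets of the pairs list
--     for r in range(1, len(pairs) + 1):
--         for subset in combinations(pairs, r):  # creating subsets of pairs taking r at a time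
--             # Build adjacency list for each subset - each element of this list corresponds to
--             # each node (or vertex) and has a list of its adjacent nodes (neighbors)
--             adj_list = [[] for _ in range(cnot_node_count)]
--             for u, v in subset:
--                 adj_list[node_map[u]].append(node_map[v])
--                 adj_list[node_map[v]].append(node_map[u])
--
--             # Check if this subset forms a cycle
--             if not _is_cyclic(adj_list, cnot_node_count):
--                 if len(subset) > len(max_subset):
--                     max_subset = subset
--
--     return list(max_subset)
-- ===== SOURCE B (Python) =====
-- def _find_max_ralph_pairs(pairs) -> list:
--     # Top-down search: try subset sizes from largest down and return the first
--     # acyclic subset found (same subset A selects); subsets come from a take/skip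
--     # recursion, and the cycle test is a DFS over an adjacency dict keyed by the
--     # original mode values (no index remapping).
--     nodes = []
--     for u, v in pairs:
--         if u not in nodes:
--             nodes.append(u)
--         if v not in nodes:
--             nodes.append(v)
--     for r in range(len(pairs), 0, -1):
--         for subset in _subsets_of_size(pairs, r):
--             if _is_forest(nodes, subset):
--                 return subset
--     return []
--
--
-- def _subsets_of_size(items, r):
--     if r == 0:
--         return [[]]
--     if len(items) < r:
--         return []
--     rest = items[1:]
--     return [[items[0]] + s for s in _subsets_of_size(rest, r - 1)] + _subsets_of_size(rest, r)
--
--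
-- def _is_forest(nodes, edges):
--     adj = {}
--     for u, v in edges:
--         adj.setdefault(u, []).append(v)
--         adj.setdefault(v, []).append(u)
--     visited = set()
--     for x in nodes:
--         if x not in visited and _dfs_cycle(adj, x, None, visited):
--             return False
--     return True
--
--
-- def _dfs_cycle(adj, v, parent, visited):
--     visited.add(v)
--     for w in adj.get(v, []):
--         if w not in visited:
--             if _dfs_cycle(adj, w, v, visited):
--                 return True
--         elif w != parent:
--             return True
--     return False
-- ===== Notes on version B (the rewrite author's own statement) =====
-- stated objective: alternative
-- what changed: A scans subset sizes bottom-up keeping a max accumulator and tests each subset with a recursive index-remapped DFS (node set + node_map + adjacency lists); B searches sizes top-down and returns the first acyclic subset found, generates subsets by a take/skip recursion instead of itertools.combinations, and tests acyclicity with a DFS over an adjacency dict keyed by the original mode values (no index remapping).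
import Mathlib
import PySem

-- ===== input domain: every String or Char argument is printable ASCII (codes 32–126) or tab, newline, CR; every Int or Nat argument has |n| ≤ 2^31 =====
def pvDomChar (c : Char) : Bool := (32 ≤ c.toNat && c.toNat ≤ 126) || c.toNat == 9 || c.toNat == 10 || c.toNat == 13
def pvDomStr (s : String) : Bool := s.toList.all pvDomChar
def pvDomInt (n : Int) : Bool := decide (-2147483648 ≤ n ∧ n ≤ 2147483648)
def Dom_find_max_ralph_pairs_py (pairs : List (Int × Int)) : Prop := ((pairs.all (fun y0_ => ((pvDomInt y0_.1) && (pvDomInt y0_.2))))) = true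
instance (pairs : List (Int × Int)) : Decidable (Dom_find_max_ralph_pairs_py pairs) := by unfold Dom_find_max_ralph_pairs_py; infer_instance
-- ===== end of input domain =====

-- B replaces A's bottom-up scan of all subsets (max accumulator, recursive index-based DFS)
-- by a top-down search that returns the first acyclic subset of the largest feasible size
-- (take/skip subset recursion, DFS on an adjacency dict keyed by the original mode values).

-- ===== PORT A =====
mutual
-- _is_cyclic_util: the fuel only makes the recursion structural; the Python recursion
-- depth is bounded by the node count, which is the fuel every caller passes.
def pvUtilA (adj : List (List Int)) : Nat → Int → List Bool → Int → Bool × List Bool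
  | 0, _, visited, _ => (true, visited)
  | fuel+1, v, visited, parent =>
      pvAdjLoopA adj fuel (PySem.List.pyGetD adj v []) (PySem.List.pySetD visited v true) v parent
  termination_by fuel _ _ _ => (fuel, 0, 0)
-- the 'for i in adj_list[v]' loop of _is_cyclic_util
def pvAdjLoopA (adj : List (List Int)) : Nat → List Int → List Bool → Int → Int → Bool × List Bool
  | _, [], visited, _, _ => (false, visited)
  | fuel, i :: rest, visited, v, parent =>
      if ¬ (PySem.List.pyGetD visited i false) then
        match pvUtilA adj fuel i visited v with
        | (true, visited') => (true, visited')
        | (false, visited') => pvAdjLoopA adj fuel rest visited' v parent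
      else if parent ≠ i then (true, visited)
      else pvAdjLoopA adj fuel rest visited v parent
  termination_by fuel ns _ _ _ => (fuel, 1, ns.length)
end


-- the 'for i in range(cnot_node_count)' loop of _is_cyclic
def pvRootLoopA (adj : List (List Int)) : List Int → List Bool → Bool
  | [], _ => false
  | i :: rest, visited =>
      if PySem.List.pyGetD visited i false then pvRootLoopA adj rest visited
      else
        match pvUtilA adj adj.length i visited (-1) with
        | (true, _) => true
        | (false, visited') => pvRootLoopA adj rest visited'

def pvIsCyclicA (adj : List (List Int)) (count : Nat) : Bool :=
  pvRootLoopA adj (PySem.List.pyRange 0 (count : Int) 1) (List.replicate count false)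

-- adjacency-list construction inside the subset loop
def pvBuildAdjA (nodeMap : PySem.Dict Int Int) (count : Nat) (subset : List (Int × Int)) :
    List (List Int) :=
  subset.foldl (fun adj uv =>
      let ui := nodeMap.getD uv.1 0   -- node_map[u]: the key is always present
      let vi := nodeMap.getD uv.2 0
      let adj := PySem.List.pySetD adj ui (PySem.List.pyGetD adj ui [] ++ [vi])
      PySem.List.pySetD adj vi (PySem.List.pyGetD adj vi [] ++ [ui]))
    (List.replicate count ([] : List Int))

-- body of the subset loop
def pvInnerA (nodeMap : PySem.Dict Int Int) (count : Nat)
    (maxSubset subset : List (Int × Int)) : List (Int × Int) :=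
  if ¬ pvIsCyclicA (pvBuildAdjA nodeMap count subset) count then
    if maxSubset.length < subset.length then subset else maxSubset
  else maxSubset

def find_max_ralph_pairs_py (pairs : List (Int × Int)) : List (Int × Int) :=
  let nodes : PySem.Set Int :=
    pairs.foldl (fun s pair => PySem.Set.update s [pair.1, pair.2]) PySem.Set.empty
  let nodeMap : PySem.Dict Int Int :=
    (PySem.List.enumerate nodes 0).foldl (fun d ix => d.insert ix.2 ix.1) PySem.Dict.empty
  let count : Nat := nodes.length
  (PySem.List.pyRange 1 ((pairs.length : Int) + 1) 1).foldl (fun maxSubset r =>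
      (PySem.List.combinations pairs r.toNat).foldl (pvInnerA nodeMap count) maxSubset)
    []

-- ===== PORT B =====
-- first-occurrence list of the modes
def pvNodesB : List (Int × Int) → List Int → List Int
  | [], nodes => nodes
  | (u, v) :: rest, nodes =>
      let nodes := if nodes.contains u then nodes else nodes ++ [u]
      let nodes := if nodes.contains v then nodes else nodes ++ [v]
      pvNodesB rest nodes

-- _subsets_of_size: take/skip recursion
def pvSubsetsOfSize : List (Int × Int) → Nat → List (List (Int × Int))
  | _, 0 => [[]]
  | items, r+1 =>
      if items.length < r+1 then []
      else
        match items with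
        | [] => []
        | x :: rest => (pvSubsetsOfSize rest r).map (x :: ·) ++ pvSubsetsOfSize rest (r+1)

-- _dfs_cycle on the value-keyed adjacency dict (fuel = node count, as passed by every caller)
mutual
def pvDfsCycleB (adj : PySem.Dict Int (List Int)) : Nat → Int → Option Int → PySem.Set Int → Bool × PySem.Set Int
  | 0, _, _, visited => (true, visited)
  | fuel+1, v, parent, visited =>
      pvNbrLoopB adj fuel (adj.getD v []) v parent (PySem.Set.add visited v)
  termination_by fuel _ _ _ => (fuel, 0, 0)
-- the 'for w in adj.get(v, [])' loop of _dfs_cycle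
def pvNbrLoopB (adj : PySem.Dict Int (List Int)) : Nat → List Int → Int → Option Int → PySem.Set Int → Bool × PySem.Set Int
  | _, [], _, _, visited => (false, visited)
  | fuel, w :: ws, v, parent, visited =>
      if ¬ visited.contains w then
        match pvDfsCycleB adj fuel w (some v) visited with
        | (true, visited') => (true, visited')
        | (false, visited') => pvNbrLoopB adj fuel ws v parent visited'
      else if some w ≠ parent then (true, visited)
      else pvNbrLoopB adj fuel ws v parent visited
  termination_by fuel ws _ _ _ => (fuel, 1, ws.length)
end


def pvAdjB (edges : List (Int × Int)) : PySem.Dict Int (List Int) :=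
  edges.foldl (fun adj uv =>
      ((adj.modify uv.1 [] (· ++ [uv.2])).modify uv.2 [] (· ++ [uv.1])))
    PySem.Dict.empty

-- _is_forest: sweep the roots in the fixed global node order
def pvIsForestB (adj : PySem.Dict Int (List Int)) (fuel : Nat) : List Int → PySem.Set Int → Bool
  | [], _ => true
  | x :: xs, visited =>
      if ¬ visited.contains x then
        match pvDfsCycleB adj fuel x none visited with
        | (true, _) => false
        | (false, visited') => pvIsForestB adj fuel xs visited'
      else pvIsForestB adj fuel xs visited

-- the 'for subset …: if _is_forest: return subset' loop
def pvFirstForestB (nodes : List Int) (fuel : Nat) : List (List (Int × Int)) → Option (List (Int × Int))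
  | [] => none
  | s :: ss =>
      if pvIsForestB (pvAdjB s) fuel nodes PySem.Set.empty then some s
      else pvFirstForestB nodes fuel ss

-- the 'for r in range(len(pairs), 0, -1)' loop
def pvSearchB (pairs : List (Int × Int)) (nodes : List Int) : Nat → List (Int × Int)
  | 0 => []
  | r+1 =>
      match pvFirstForestB nodes nodes.length (pvSubsetsOfSize pairs (r+1)) with
      | some s => s
      | none => pvSearchB pairs nodes r

def find_max_ralph_pairs_py_alt (pairs : List (Int × Int)) : List (Int × Int) :=
  pvSearchB pairs (pvNodesB pairs []) pairs.length

-- ===== PRECONDITION & SPEC =====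
def Spec_find_max_ralph_pairs_py (pairs : List (Int × Int)) (out : List (Int × Int)) : Prop := out = find_max_ralph_pairs_py_alt pairs
instance (pairs : List (Int × Int)) (out : List (Int × Int)) : Decidable (Spec_find_max_ralph_pairs_py pairs out) := by unfold Spec_find_max_ralph_pairs_py; infer_instance

-- ===== CLAIM (what is proved, stated in full; the proofs are below) =====
def Claim_equal_find_max_ralph_pairs_py : Prop := ∀ (pairs : List (Int × Int)), Dom_find_max_ralph_pairs_py pairs → Spec_find_max_ralph_pairs_py pairs (find_max_ralph_pairs_py pairs)


-- ===== LEMMAS AND PROOFS =====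

-- ---- the node list: B's first-occurrence list is A's set-update fold ----

theorem pv_nodesB_eq_fold : ∀ (ps : List (Int × Int)) (acc : List Int),
    pvNodesB ps acc = ps.foldl (fun s pair => PySem.Set.update s [pair.1, pair.2]) acc := by
  intro ps
  induction ps with
  | nil => intro acc; rfl
  | cons p t ih =>
      intro acc
      obtain ⟨u, v⟩ := p
      simp only [pvNodesB, List.foldl, ih, PySem.Set.update, PySem.Set.add, PySem.Set.contains]

def pvN (pairs : List (Int × Int)) : List Int := pvNodesB pairs []

theorem pv_nodesB_nodup : ∀ (ps : List (Int × Int)) (acc : List Int),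
    acc.Nodup → (pvNodesB ps acc).Nodup := by
  intro ps
  induction ps with
  | nil => intro acc h; exact h
  | cons p t ih =>
      intro acc h
      obtain ⟨u, v⟩ := p
      simp only [pvNodesB]
      apply ih
      have step : ∀ (l : List Int) (x : Int), l.Nodup → (if l.contains x then l else l ++ [x]).Nodup := by
        intro l x hl
        by_cases hx : x ∈ l
        · rw [if_pos (by simpa using hx)]; exact hl
        · rw [if_neg (by simpa using hx)]
          rw [List.nodup_append]
          refine ⟨hl, List.nodup_singleton x, ?_⟩
          intro a ha b hbmem
          rw [List.mem_singleton] at hbmem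
          subst hbmem
          exact fun hax => hx (hax ▸ ha)
      exact step _ v (step _ u h)

theorem pv_nodesB_mono : ∀ (ps : List (Int × Int)) (acc : List Int) (x : Int),
    x ∈ acc → x ∈ pvNodesB ps acc := by
  intro ps
  induction ps with
  | nil => intro acc x h; exact h
  | cons p t ih =>
      intro acc x h
      obtain ⟨u, v⟩ := p
      simp only [pvNodesB]
      apply ih
      by_cases h1 : acc.contains u <;> by_cases h2 : (if acc.contains u then acc else acc ++ [u]).contains v <;>
        simp_all

theorem pv_nodesB_cover : ∀ (ps : List (Int × Int)) (acc : List Int) (uv : Int × Int),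
    uv ∈ ps → uv.1 ∈ pvNodesB ps acc ∧ uv.2 ∈ pvNodesB ps acc := by
  intro ps
  induction ps with
  | nil => intro acc uv h; simp at h
  | cons p t ih =>
      intro acc uv h
      obtain ⟨u, v⟩ := p
      rcases List.mem_cons.1 h with h | h
      · subst h
        simp only [pvNodesB]
        constructor <;> apply pv_nodesB_mono <;>
          by_cases h1 : acc.contains u <;>
          by_cases h2 : (if acc.contains u then acc else acc ++ [u]).contains v <;>
          simp_all [List.contains_iff_mem]
      · exact ih _ uv h

-- ---- the node_map dict: lookup is the index in the node list ----

def pvNM (N : List Int) : PySem.Dict Int Int :=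
  (PySem.List.enumerate N 0).foldl (fun d ix => d.insert ix.2 ix.1) PySem.Dict.empty

theorem pv_get?_fold_insert_of_ne (x : Int) :
    ∀ (L : List (Int × Int)) (d : PySem.Dict Int Int),
      (∀ p ∈ L, p.2 ≠ x) →
      (L.foldl (fun d ix => d.insert ix.2 ix.1) d).get? x = d.get? x := by
  intro L
  induction L with
  | nil => intro d _; rfl
  | cons p t ih =>
      intro d h
      simp only [List.foldl]
      rw [ih _ (fun q hq => h q (List.mem_cons_of_mem _ hq)),
        PySem.Dict.get?_insert_of_ne _ _ (Ne.symm (h p (List.mem_cons_self ..)))]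

theorem pv_nodeMap_getD : ∀ (l : List Int) (s : Int) (d : PySem.Dict Int Int) (x : Int),
    x ∈ l → l.Nodup → d.contains x = false →
    ((PySem.List.enumerate l s).foldl (fun d ix => d.insert ix.2 ix.1) d).getD x 0
      = s + (l.idxOf x : Int) := by
  intro l
  induction l with
  | nil => intro s d x hx; simp at hx
  | cons y t ih =>
      intro s d x hx hnd hc
      rw [PySem.List.enumerate_cons]
      simp only [List.foldl]
      by_cases hxy : x = y
      · subst hxy
        have hxt : x ∉ t := by simp at hnd; exact hnd.1
        have : ∀ p ∈ PySem.List.enumerate t (s+1), p.2 ≠ x := by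
          intro p hp
          rw [PySem.List.mem_enumerate_iff] at hp
          obtain ⟨k, hk, rfl⟩ := hp
          intro hco
          exact hxt (hco ▸ List.getElem_mem hk)
        unfold PySem.Dict.getD
        rw [pv_get?_fold_insert_of_ne x _ _ this, PySem.Dict.get?_insert_self]
        simp [List.idxOf_cons_self]
      · have hxt : x ∈ t := by rcases List.mem_cons.1 hx with h | h; exact absurd h hxy; exact h
        have hnd' : t.Nodup := (List.nodup_cons.1 hnd).2
        have hc' : (d.insert y s).contains x = false := by
          rw [PySem.Dict.contains_insert]
          simp [hxy, hc]
        rw [ih (s+1) _ x hxt hnd' hc', List.idxOf_cons_ne _ (fun h => hxy h.symm)]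
        push_cast
        ring

-- ---- simulation relations between the two DFS implementations ----

def PvVisRel (N : List Int) (visA : List Bool) (visB : PySem.Set Int) : Prop :=
  visA.length = N.length ∧
    ∀ k, k < N.length → visA[k]? = some (visB.contains (N.getD k 0))

def PvAdjRel (N : List Int) (adjA : List (List Int)) (adjB : PySem.Dict Int (List Int)) : Prop :=
  adjA.length = N.length ∧
    ∀ k, k < N.length →
      (∀ y ∈ adjB.getD (N.getD k 0) [], y ∈ N) ∧
      adjA[k]? = some ((adjB.getD (N.getD k 0) []).map (fun y => ((N.idxOf y : Nat) : Int)))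

def PvParRel (N : List Int) (pA : Int) (pB : Option Int) : Prop :=
  (pA = -1 ∧ pB = none) ∨ ∃ p, p ∈ N ∧ pA = ((N.idxOf p : Nat) : Int) ∧ pB = some p

theorem pv_idxOf_inj (N : List Int) (hN : N.Nodup) {p w : Int} (hp : p ∈ N) (hw : w ∈ N)
    (h : N.idxOf p = N.idxOf w) : p = w := by
  have hpl := List.idxOf_lt_length_of_mem hp
  have hwl := List.idxOf_lt_length_of_mem hw
  rw [← List.getElem_idxOf hpl, ← List.getElem_idxOf hwl]
  simp [h]

theorem pv_getD_idxOf (N : List Int) {w : Int} (hw : w ∈ N) :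
    N.getD (N.idxOf w) 0 = w := by
  rw [List.getD_eq_getElem N 0 (List.idxOf_lt_length_of_mem hw)]
  exact List.getElem_idxOf (List.idxOf_lt_length_of_mem hw)

theorem pv_visrel_add (N : List Int) (hN : N.Nodup) (visA : List Bool) (visB : PySem.Set Int)
    (v : Int) (hv : v ∈ N) (h : PvVisRel N visA visB) :
    PvVisRel N (PySem.List.pySetD visA ((N.idxOf v : Nat) : Int) true) (PySem.Set.add visB v) := by
  obtain ⟨hlen, hk⟩ := h
  have hvi : N.idxOf v < N.length := List.idxOf_lt_length_of_mem hv
  rw [PySem.List.pySetD_natCast]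
  refine ⟨by simpa using hlen, ?_⟩
  intro k hkN
  rw [List.getElem?_set]
  by_cases he : N.idxOf v = k
  · subst he
    have h1 : N.getD (N.idxOf v) 0 = v := pv_getD_idxOf N hv
    have h2 : (PySem.Set.add visB v).contains v = true := by
      rw [PySem.Set.contains_iff]
      exact (PySem.Set.mem_add visB v v).2 (Or.inr rfl)
    simp [hlen, hvi, h1, h2]
  · have hne : N.getD k 0 ≠ v := by
      intro hc
      apply he
      have : N[k] = v := by rwa [List.getD_eq_getElem N 0 hkN] at hc
      rw [← this, List.Nodup.idxOf_getElem hN k hkN]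
    have h2 : (PySem.Set.add visB v).contains (N.getD k 0) = visB.contains (N.getD k 0) := by
      rcases Bool.eq_false_or_eq_true (visB.contains (N.getD k 0)) with hb | hb <;> rw [hb]
      · rw [PySem.Set.contains_iff] at hb ⊢
        exact (PySem.Set.mem_add visB v _).2 (Or.inl hb)
      · rw [← Bool.not_eq_true, PySem.Set.contains_iff, PySem.Set.mem_add]
        rw [← Bool.not_eq_true, PySem.Set.contains_iff] at hb
        tauto
    rw [if_neg he, hk k hkN, h2]

-- S1 fuel: the two recursive DFS functions agree
def PvS1 (N : List Int) (adjA : List (List Int)) (adjB : PySem.Dict Int (List Int))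
    (fuel : Nat) : Prop :=
  ∀ v pA pB visA visB, v ∈ N → PvVisRel N visA visB → PvParRel N pA pB →
    (pvUtilA adjA fuel ((N.idxOf v : Nat) : Int) visA pA).1
      = (pvDfsCycleB adjB fuel v pB visB).1 ∧
    PvVisRel N (pvUtilA adjA fuel ((N.idxOf v : Nat) : Int) visA pA).2
      (pvDfsCycleB adjB fuel v pB visB).2

theorem pv_loop_sim (N : List Int) (hN : N.Nodup) (adjA : List (List Int))
    (adjB : PySem.Dict Int (List Int)) (fuel : Nat)
    (hS1 : PvS1 N adjA adjB fuel) :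
    ∀ ws v pA pB visA visB, (∀ w ∈ ws, w ∈ N) → v ∈ N → PvVisRel N visA visB →
      PvParRel N pA pB →
      (pvAdjLoopA adjA fuel (ws.map (fun y => ((N.idxOf y : Nat) : Int))) visA
          ((N.idxOf v : Nat) : Int) pA).1
        = (pvNbrLoopB adjB fuel ws v pB visB).1 ∧
      PvVisRel N (pvAdjLoopA adjA fuel (ws.map (fun y => ((N.idxOf y : Nat) : Int))) visA
          ((N.idxOf v : Nat) : Int) pA).2
        (pvNbrLoopB adjB fuel ws v pB visB).2 := by
  intro ws
  induction ws with
  | nil =>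
      intro v pA pB visA visB _ _ hvis _
      constructor
      · simp [pvAdjLoopA, pvNbrLoopB]
      · simpa [pvAdjLoopA, pvNbrLoopB] using hvis
  | cons w ws ih =>
      intro v pA pB visA visB hws hv hvis hpar
      have hw : w ∈ N := hws w (List.mem_cons_self ..)
      have hws' : ∀ x ∈ ws, x ∈ N := fun x hx => hws x (List.mem_cons_of_mem _ hx)
      have hwi : N.idxOf w < N.length := List.idxOf_lt_length_of_mem hw
      have htest : PySem.List.pyGetD visA ((N.idxOf w : Nat) : Int) false
          = visB.contains w := by
        rw [PySem.List.pyGetD_natCast, List.getD_eq_getElem?_getD,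
          hvis.2 (N.idxOf w) hwi, pv_getD_idxOf N hw]
        rfl
      by_cases hb : visB.contains w = true
      · -- w is already visited
        have hmem : w ∈ visB := (PySem.Set.contains_iff _ _).1 hb
        have hA1 : PySem.List.pyGetD visA ((N.idxOf w : Nat) : Int) false = true := by
          rw [htest, hb]
        rcases hpar with ⟨rfl, rfl⟩ | ⟨p, hp, rfl, rfl⟩
        · -- root parent: the back edge is a cycle on both sides
          have hne : ¬ (-1 : Int) = ((N.idxOf w : Nat) : Int) := by
            have : (0:Int) ≤ ((N.idxOf w : Nat) : Int) := Int.natCast_nonneg _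
            omega
          constructor
          · simp [pvAdjLoopA, pvNbrLoopB, hA1, hmem, hne]
          · simpa [pvAdjLoopA, pvNbrLoopB, hA1, hmem, hne] using hvis
        · by_cases hpw : p = w
          · -- the edge back to the parent is skipped on both sides
            subst hpw
            have hrec := ih v ((N.idxOf p : Nat) : Int) (some p) visA visB hws' hv hvis
              (Or.inr ⟨p, hp, rfl, rfl⟩)
            constructor
            · simpa [pvAdjLoopA, pvNbrLoopB, hA1, hmem] using hrec.1
            · simpa [pvAdjLoopA, pvNbrLoopB, hA1, hmem] using hrec.2
          · -- a visited non-parent neighbour: cycle on both sides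
            have hne : ¬ ((N.idxOf p : Nat) : Int) = ((N.idxOf w : Nat) : Int) := by
              intro hc
              exact hpw (pv_idxOf_inj N hN hp hw (by exact_mod_cast hc))
            have hne' : ¬ w = p := fun hc => hpw hc.symm
            constructor
            · simp [pvAdjLoopA, pvNbrLoopB, hA1, hmem, hne, hne']
            · simpa [pvAdjLoopA, pvNbrLoopB, hA1, hmem, hne, hne'] using hvis
      · -- w is unvisited: both sides recurse into it
        have hb' : visB.contains w = false := by
          rcases Bool.eq_false_or_eq_true (visB.contains w) with h | h
          · exact absurd h hb
          · exact h
        have hnmem : ¬ w ∈ visB := by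
          rw [← PySem.Set.contains_iff, hb']
          simp
        have hA1 : PySem.List.pyGetD visA ((N.idxOf w : Nat) : Int) false = false := by
          rw [htest, hb']
        obtain ⟨h1, h2⟩ := hS1 w ((N.idxOf v : Nat) : Int) (some v) visA visB hw hvis
          (Or.inr ⟨v, hv, rfl, rfl⟩)
        rcases hA : pvUtilA adjA fuel ((N.idxOf w : Nat) : Int) visA ((N.idxOf v : Nat) : Int)
          with ⟨ba, va⟩
        rcases hB : pvDfsCycleB adjB fuel w (some v) visB with ⟨bb, vb⟩
        rw [hA, hB] at h1 h2
        simp only at h1 h2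
        subst h1
        cases ba with
        | true =>
            constructor
            · simp [pvAdjLoopA, pvNbrLoopB, hA1, hnmem, hA, hB]
            · simpa [pvAdjLoopA, pvNbrLoopB, hA1, hnmem, hA, hB] using h2
        | false =>
            have hrec := ih v pA pB va vb hws' hv h2 hpar
            constructor
            · simpa [pvAdjLoopA, pvNbrLoopB, hA1, hnmem, hA, hB] using hrec.1
            · simpa [pvAdjLoopA, pvNbrLoopB, hA1, hnmem, hA, hB] using hrec.2

theorem pv_util_sim (N : List Int) (hN : N.Nodup) (adjA : List (List Int))
    (adjB : PySem.Dict Int (List Int)) (hadj : PvAdjRel N adjA adjB) :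
    ∀ fuel, PvS1 N adjA adjB fuel := by
  intro fuel
  induction fuel with
  | zero =>
      intro v pA pB visA visB hv hvis hpar
      constructor
      · simp [pvUtilA, pvDfsCycleB]
      · simpa [pvUtilA, pvDfsCycleB] using hvis
  | succ n ih =>
      intro v pA pB visA visB hv hvis hpar
      have hvi : N.idxOf v < N.length := List.idxOf_lt_length_of_mem hv
      have hnbrs : PySem.List.pyGetD adjA ((N.idxOf v : Nat) : Int) []
          = (adjB.getD v []).map (fun y => ((N.idxOf y : Nat) : Int)) := by
        rw [PySem.List.pyGetD_natCast, List.getD_eq_getElem?_getD,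
          (hadj.2 (N.idxOf v) hvi).2, pv_getD_idxOf N hv]
        rfl
      simp only [pvUtilA, pvDfsCycleB, hnbrs]
      exact pv_loop_sim N hN adjA adjB n ih (adjB.getD v []) v pA pB _ _
        (by rw [← pv_getD_idxOf N hv]; exact (hadj.2 (N.idxOf v) hvi).1)
        hv (pv_visrel_add N hN visA visB v hv hvis) hpar

-- ---- root sweep: _is_cyclic vs _is_forest ----

theorem pv_sweep_sim (N : List Int) (hN : N.Nodup) (adjA : List (List Int))
    (adjB : PySem.Dict Int (List Int)) (hadj : PvAdjRel N adjA adjB) :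
    ∀ xs visA visB, (∀ x ∈ xs, x ∈ N) → PvVisRel N visA visB →
      pvRootLoopA adjA (xs.map (fun y => ((N.idxOf y : Nat) : Int))) visA
        = ! pvIsForestB adjB N.length xs visB := by
  intro xs
  induction xs with
  | nil => intro visA visB _ _; simp [pvRootLoopA, pvIsForestB]
  | cons x xs ih =>
      intro visA visB hxs hvis
      have hx : x ∈ N := hxs x (List.mem_cons_self ..)
      have hxs' : ∀ y ∈ xs, y ∈ N := fun y hy => hxs y (List.mem_cons_of_mem _ hy)
      have hxi : N.idxOf x < N.length := List.idxOf_lt_length_of_mem hx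
      have htest : PySem.List.pyGetD visA ((N.idxOf x : Nat) : Int) false
          = visB.contains x := by
        rw [PySem.List.pyGetD_natCast, List.getD_eq_getElem?_getD,
          hvis.2 (N.idxOf x) hxi, pv_getD_idxOf N hx]
        rfl
      by_cases hb : visB.contains x = true
      · have hmem : x ∈ visB := (PySem.Set.contains_iff _ _).1 hb
        have hA1 : PySem.List.pyGetD visA ((N.idxOf x : Nat) : Int) false = true := by
          rw [htest, hb]
        rw [show pvRootLoopA adjA ((x :: xs).map (fun y => ((N.idxOf y : Nat) : Int))) visA
            = pvRootLoopA adjA (xs.map (fun y => ((N.idxOf y : Nat) : Int))) visA by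
          simp [pvRootLoopA, hA1]]
        rw [show pvIsForestB adjB N.length (x :: xs) visB
            = pvIsForestB adjB N.length xs visB by
          simp [pvIsForestB, hmem]]
        exact ih visA visB hxs' hvis
      · have hb' : visB.contains x = false := by
          rcases Bool.eq_false_or_eq_true (visB.contains x) with h | h
          · exact absurd h hb
          · exact h
        have hnmem : ¬ x ∈ visB := by
          rw [← PySem.Set.contains_iff, hb']
          simp
        have hA1 : PySem.List.pyGetD visA ((N.idxOf x : Nat) : Int) false = false := by
          rw [htest, hb']
        have hfuel : adjA.length = N.length := hadj.1
        obtain ⟨h1, h2⟩ := pv_util_sim N hN adjA adjB hadj N.length x (-1) none visA visB hx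
          hvis (Or.inl ⟨rfl, rfl⟩)
        rcases hA : pvUtilA adjA N.length ((N.idxOf x : Nat) : Int) visA (-1) with ⟨ba, va⟩
        rcases hB : pvDfsCycleB adjB N.length x none visB with ⟨bb, vb⟩
        rw [hA, hB] at h1 h2
        simp only at h1 h2
        subst h1
        cases ba with
        | true => simp [pvRootLoopA, pvIsForestB, hA1, hnmem, hfuel, hA, hB]
        | false =>
            rw [show pvRootLoopA adjA ((x :: xs).map (fun y => ((N.idxOf y : Nat) : Int))) visA
                = pvRootLoopA adjA (xs.map (fun y => ((N.idxOf y : Nat) : Int))) va by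
              simp [pvRootLoopA, hA1, hfuel, hA]]
            rw [show pvIsForestB adjB N.length (x :: xs) visB
                = pvIsForestB adjB N.length xs vb by
              simp [pvIsForestB, hnmem, hB]]
            exact ih va vb hxs' h2

theorem pv_visrel_init (N : List Int) :
    PvVisRel N (List.replicate N.length false) PySem.Set.empty := by
  constructor
  · simp
  · intro k hk
    simp [List.getElem?_replicate, hk, PySem.Set.contains, PySem.Set.empty]

theorem pv_map_idx_eq_pyRange (N : List Int) (hN : N.Nodup) :
    N.map (fun y => ((N.idxOf y : Nat) : Int)) = PySem.List.pyRange 0 (N.length : Int) 1 := by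
  apply List.ext_getElem
  · simp [PySem.List.length_pyRange_one]
  · intro k h1 h2
    rw [PySem.List.getElem_pyRange_one]
    simp only [List.getElem_map]
    rw [List.Nodup.idxOf_getElem hN]
    omega

theorem pv_cyclic_eq (N : List Int) (hN : N.Nodup) (adjA : List (List Int))
    (adjB : PySem.Dict Int (List Int)) (hadj : PvAdjRel N adjA adjB) :
    pvIsCyclicA adjA N.length = ! pvIsForestB adjB N.length N PySem.Set.empty := by
  unfold pvIsCyclicA
  rw [← pv_map_idx_eq_pyRange N hN]
  exact pv_sweep_sim N hN adjA adjB hadj N _ _ (fun x hx => hx) (pv_visrel_init N)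

-- ---- the two adjacency constructions correspond ----

theorem pv_idx_eq_iff (N : List Int) (hN : N.Nodup) {v : Int} (hv : v ∈ N)
    {k : Nat} (hk : k < N.length) : N.idxOf v = k ↔ N.getD k 0 = v := by
  constructor
  · intro h; rw [← h]; exact pv_getD_idxOf N hv
  · intro h
    rw [List.getD_eq_getElem N 0 hk] at h
    rw [← h, List.Nodup.idxOf_getElem hN]

theorem pv_adjrel_init (N : List Int) :
    PvAdjRel N (List.replicate N.length []) PySem.Dict.empty := by
  constructor
  · simp
  · intro k hk
    constructor
    · intro y hy
      simp [PySem.Dict.getD, PySem.Dict.get?, PySem.Dict.empty] at hy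
    · simp [List.getElem?_replicate, hk, PySem.Dict.getD, PySem.Dict.get?, PySem.Dict.empty]

theorem pv_nm_getD (N : List Int) (hN : N.Nodup) {u : Int} (hu : u ∈ N) :
    (pvNM N).getD u 0 = ((N.idxOf u : Nat) : Int) := by
  unfold pvNM
  rw [pv_nodeMap_getD N 0 PySem.Dict.empty u hu hN
    (by simp [PySem.Dict.contains, PySem.Dict.empty])]
  simp

theorem pv_adjrel_step (N : List Int) (hN : N.Nodup) (a : List (List Int))
    (b : PySem.Dict Int (List Int)) (h : PvAdjRel N a b) (u v : Int)
    (hu : u ∈ N) (hv : v ∈ N) :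
    PvAdjRel N
      (PySem.List.pySetD
        (PySem.List.pySetD a ((pvNM N).getD u 0)
          (PySem.List.pyGetD a ((pvNM N).getD u 0) [] ++ [(pvNM N).getD v 0]))
        ((pvNM N).getD v 0)
        (PySem.List.pyGetD
          (PySem.List.pySetD a ((pvNM N).getD u 0)
            (PySem.List.pyGetD a ((pvNM N).getD u 0) [] ++ [(pvNM N).getD v 0]))
          ((pvNM N).getD v 0) [] ++ [(pvNM N).getD u 0]))
      ((b.modify u [] (· ++ [v])).modify v [] (· ++ [u])) := by
  obtain ⟨hlen, hk⟩ := h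
  have hui : N.idxOf u < N.length := List.idxOf_lt_length_of_mem hu
  have hvi : N.idxOf v < N.length := List.idxOf_lt_length_of_mem hv
  rw [pv_nm_getD N hN hu, pv_nm_getD N hN hv]
  rw [PySem.List.pySetD_natCast, PySem.List.pyGetD_natCast, PySem.List.pySetD_natCast,
    PySem.List.pyGetD_natCast]
  simp only [PySem.Dict.modify]
  constructor
  · simp [hlen]
  · intro k hkN
    have hgu : N.getD (N.idxOf u) 0 = u := pv_getD_idxOf N hu
    have hgv : N.getD (N.idxOf v) 0 = v := pv_getD_idxOf N hv
    -- B-side lookups after the two inserts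
    have hb2 : ∀ x, ((b.insert u (b.getD u [] ++ [v])).insert v
          ((b.insert u (b.getD u [] ++ [v])).getD v [] ++ [u])).getD x []
        = if x = v then (if v = u then b.getD u [] ++ [v] else b.getD v []) ++ [u]
          else if x = u then b.getD u [] ++ [v] else b.getD x [] := by
      intro x
      rw [PySem.Dict.getD_insert]
      by_cases hxv : x = v
      · subst hxv
        rw [if_pos rfl, if_pos rfl, PySem.Dict.getD_insert]
      · rw [if_neg hxv, if_neg hxv, PySem.Dict.getD_insert]
    constructor
    · intro y hy
      rw [hb2] at hy
      have hmem := hk k hkN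
      split_ifs at hy with h1 h2 h3
      · rcases List.mem_append.1 hy with hy | hy
        · rcases List.mem_append.1 hy with hy | hy
          · exact (hk (N.idxOf u) hui).1 y (by rwa [hgu])
          · rw [List.mem_singleton] at hy; rw [hy]; exact hv
        · rw [List.mem_singleton] at hy; rw [hy]; exact hu
      · rcases List.mem_append.1 hy with hy | hy
        · exact (hk (N.idxOf v) hvi).1 y (by rwa [hgv])
        · rw [List.mem_singleton] at hy; rw [hy]; exact hu
      · rcases List.mem_append.1 hy with hy | hy
        · exact (hk (N.idxOf u) hui).1 y (by rwa [hgu])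
        · rw [List.mem_singleton] at hy; rw [hy]; exact hv
      · exact hmem.1 y hy
    · rw [hb2]
      by_cases hkv : N.idxOf v = k
      · subst hkv
        rw [if_pos hgv]
        rw [List.getElem?_set, if_pos rfl,
          if_pos (by rw [List.length_set, hlen]; exact hvi)]
        by_cases hvu : v = u
        · subst hvu
          rw [if_pos rfl]
          rw [List.getD_eq_getElem?_getD, List.getElem?_set, if_pos rfl,
            if_pos (by rw [hlen]; exact hvi)]
          have hmain := (hk (N.idxOf v) hvi).2
          rw [hgv] at hmain
          simp [hmain]
        · have hne : ¬ N.idxOf u = N.idxOf v := fun hc =>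
            hvu (pv_idxOf_inj N hN hv hu hc.symm)
          rw [if_neg hvu]
          rw [List.getD_eq_getElem?_getD, List.getElem?_set, if_neg hne]
          have hmain := (hk (N.idxOf v) hvi).2
          rw [hgv] at hmain
          simp [hmain]
      · have hxv : ¬ N.getD k 0 = v := fun hc => hkv ((pv_idx_eq_iff N hN hv hkN).2 hc)
        rw [if_neg hxv, List.getElem?_set, if_neg hkv, List.getElem?_set]
        by_cases hku : N.idxOf u = k
        · subst hku
          rw [if_pos hgu, if_pos rfl, if_pos (by rw [hlen]; exact hui)]
          have hmain := (hk (N.idxOf u) hui).2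
          rw [hgu] at hmain
          simp [hmain]
        · have hxu : ¬ N.getD k 0 = u := fun hc => hku ((pv_idx_eq_iff N hN hu hkN).2 hc)
          rw [if_neg hxu, if_neg hku]
          exact (hk k hkN).2


theorem pv_build_adj_rel (N : List Int) (hN : N.Nodup) :
    ∀ (s : List (Int × Int)) (a : List (List Int)) (b : PySem.Dict Int (List Int)),
      PvAdjRel N a b → (∀ uv ∈ s, uv.1 ∈ N ∧ uv.2 ∈ N) →
      PvAdjRel N
        (s.foldl (fun adj uv =>
          let ui := (pvNM N).getD uv.1 0
          let vi := (pvNM N).getD uv.2 0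
          let adj := PySem.List.pySetD adj ui (PySem.List.pyGetD adj ui [] ++ [vi])
          PySem.List.pySetD adj vi (PySem.List.pyGetD adj vi [] ++ [ui])) a)
        (s.foldl (fun adj uv =>
          ((adj.modify uv.1 [] (· ++ [uv.2])).modify uv.2 [] (· ++ [uv.1]))) b) := by
  intro s
  induction s with
  | nil => intro a b h _; exact h
  | cons uv t ih =>
      intro a b h hs
      simp only [List.foldl]
      exact ih _ _
        (pv_adjrel_step N hN a b h uv.1 uv.2 (hs uv (List.mem_cons_self ..)).1
          (hs uv (List.mem_cons_self ..)).2)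
        (fun q hq => hs q (List.mem_cons_of_mem _ hq))

-- the per-subset test of port A equals the per-subset test of port B
def pvT (N : List Int) (s : List (Int × Int)) : Bool :=
  pvIsForestB (pvAdjB s) N.length N PySem.Set.empty

theorem pv_test_eq (N : List Int) (hN : N.Nodup) (s : List (Int × Int))
    (hs : ∀ uv ∈ s, uv.1 ∈ N ∧ uv.2 ∈ N) :
    pvIsCyclicA (pvBuildAdjA (pvNM N) N.length s) N.length = ! pvT N s :=
  pv_cyclic_eq N hN _ _
    (pv_build_adj_rel N hN s _ _ (pv_adjrel_init N) hs)

-- ---- subset enumeration: the take/skip recursion is itertools.combinations ----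

theorem pv_subs_eq : ∀ (items : List (Int × Int)) (r : Nat),
    pvSubsetsOfSize items r = PySem.List.combinations items r := by
  intro items
  induction items with
  | nil =>
      intro r
      cases r with
      | zero => simp [pvSubsetsOfSize, PySem.List.combinations_zero]
      | succ r => simp [pvSubsetsOfSize, PySem.List.combinations_nil_succ]
  | cons x rest ih =>
      intro r
      cases r with
      | zero => simp [pvSubsetsOfSize, PySem.List.combinations_zero]
      | succ r =>
          simp only [pvSubsetsOfSize]
          by_cases hlen : (x :: rest).length < r + 1
          · rw [if_pos hlen, PySem.List.combinations_eq_nil_of_length_lt _ hlen]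
          · rw [if_neg hlen, PySem.List.combinations_cons_succ, ih, ih]

-- the common recursion both programs compute: the first acyclic subset of the
-- largest size that has one
def pvG (pairs : List (Int × Int)) (N : List Int) : Nat → List (Int × Int)
  | 0 => []
  | m+1 =>
      match (PySem.List.combinations pairs (m+1)).find? (pvT N) with
      | some s => s
      | none => pvG pairs N m

theorem pv_firstForest_eq (N : List Int) :
    ∀ L, pvFirstForestB N N.length L = L.find? (pvT N) := by
  intro L
  induction L with
  | nil => simp [pvFirstForestB]
  | cons t ss ih =>
      cases h : pvIsForestB (pvAdjB t) N.length N ([] : PySem.Set Int) <;>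
        simp [pvFirstForestB, List.find?_cons, pvT, PySem.Set.empty, h, ih]

theorem pv_searchB_eq (pairs : List (Int × Int)) (N : List Int) :
    ∀ m, pvSearchB pairs N m = pvG pairs N m := by
  intro m
  induction m with
  | zero => rfl
  | succ m ih => simp only [pvSearchB, pvG, pv_firstForest_eq, pv_subs_eq, ih]

-- ---- port A's accumulator loop computes the same recursion ----

theorem pv_innerA_skip (N : List Int) :
    ∀ (L : List (List (Int × Int))) (acc : List (Int × Int)),
      (∀ t ∈ L, t.length ≤ acc.length) →
      L.foldl (pvInnerA (pvNM N) N.length) acc = acc := by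
  intro L
  induction L with
  | nil => intro acc _; rfl
  | cons t L' ih =>
      intro acc h
      have hstep : pvInnerA (pvNM N) N.length acc t = acc := by
        have h' : ¬ acc.length < t.length := not_lt.2 (h t (List.mem_cons_self ..))
        simp [pvInnerA, h']
      simp only [List.foldl, hstep]
      exact ih acc (fun q hq => h q (List.mem_cons_of_mem _ hq))

theorem pv_innerA_eq (N : List Int) (hN : N.Nodup) (pairs : List (Int × Int))
    (hcov : ∀ uv ∈ pairs, uv.1 ∈ N ∧ uv.2 ∈ N) :
    ∀ (L : List (List (Int × Int))) (acc : List (Int × Int)) (r : Nat),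
      (∀ s ∈ L, s.length = r ∧ s.Sublist pairs) → acc.length < r →
      L.foldl (pvInnerA (pvNM N) N.length) acc
        = match L.find? (pvT N) with
          | some s => s
          | none => acc := by
  intro L
  induction L with
  | nil => intro acc r _ _; rfl
  | cons s L' ih =>
      intro acc r hL hacc
      obtain ⟨hslen, hssub⟩ := hL s (List.mem_cons_self ..)
      have hsnodes : ∀ uv ∈ s, uv.1 ∈ N ∧ uv.2 ∈ N :=
        fun uv huv => hcov uv (hssub.subset huv)
      have htest := pv_test_eq N hN s hsnodes
      simp only [List.foldl]
      cases hT : pvT N s with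
      | true =>
          have hstep : pvInnerA (pvNM N) N.length acc s = s := by
            unfold pvInnerA
            rw [htest, hT]
            simp [hslen ▸ hacc]
          rw [hstep,
            pv_innerA_skip N L' s
              (fun t ht => le_of_eq (((hL t (List.mem_cons_of_mem _ ht)).1).trans hslen.symm))]
          simp [List.find?_cons, hT]
      | false =>
          have hstep : pvInnerA (pvNM N) N.length acc s = acc := by
            unfold pvInnerA
            rw [htest, hT]
            simp
          rw [hstep, ih acc r (fun t ht => hL t (List.mem_cons_of_mem _ ht)) hacc]
          simp [List.find?_cons, hT]

theorem pv_G_len (pairs : List (Int × Int)) (N : List Int) :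
    ∀ m, (pvG pairs N m).length ≤ m := by
  intro m
  induction m with
  | zero => simp [pvG]
  | succ m ih =>
      simp only [pvG]
      cases hf : (PySem.List.combinations pairs (m+1)).find? (pvT N) with
      | none => exact le_trans ih (Nat.le_succ m)
      | some s =>
          have hs := List.mem_of_find?_eq_some hf
          rw [PySem.List.mem_combinations_iff] at hs
          simp [hs.2]

theorem pv_foldA_eq (N : List Int) (hN : N.Nodup) (pairs : List (Int × Int))
    (hcov : ∀ uv ∈ pairs, uv.1 ∈ N ∧ uv.2 ∈ N) :
    ∀ m, (List.range m).foldl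
        (fun acc k => (PySem.List.combinations pairs (k+1)).foldl
          (pvInnerA (pvNM N) N.length) acc) []
      = pvG pairs N m := by
  intro m
  induction m with
  | zero => rfl
  | succ m ih =>
      rw [List.range_succ, List.foldl_append, ih]
      show (PySem.List.combinations pairs (m+1)).foldl (pvInnerA (pvNM N) N.length)
          (pvG pairs N m) = _
      rw [pv_innerA_eq N hN pairs hcov _ (pvG pairs N m) (m+1)
        (fun s hs => by
          rw [PySem.List.mem_combinations_iff] at hs
          exact ⟨hs.2, hs.1⟩)
        (Nat.lt_succ_of_le (pv_G_len pairs N m))]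
      simp only [pvG]

theorem pv_A_eq (pairs : List (Int × Int)) :
    find_max_ralph_pairs_py pairs = pvG pairs (pvN pairs) pairs.length := by
  have hN : (pvN pairs).Nodup := pv_nodesB_nodup pairs [] List.nodup_nil
  have hcov : ∀ uv ∈ pairs, uv.1 ∈ pvN pairs ∧ uv.2 ∈ pvN pairs :=
    fun uv huv => pv_nodesB_cover pairs [] uv huv
  unfold find_max_ralph_pairs_py
  rw [← pv_nodesB_eq_fold]
  have hrange : PySem.List.pyRange 1 ((pairs.length : Int) + 1) 1
      = (List.range pairs.length).map (fun k : Nat => (1 : Int) + (k : Int)) := by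
    apply List.ext_getElem
    · rw [PySem.List.length_pyRange_one]
      simp
    · intro k h1 h2
      rw [PySem.List.getElem_pyRange_one]
      simp
  rw [hrange, List.foldl_map]
  have htoNat : ∀ (k : Nat), ((1 : Int) + (k : Int)).toNat = k + 1 := fun k => by omega
  simp only [htoNat]
  exact pv_foldA_eq (pvN pairs) hN pairs hcov pairs.length

-- ===== VERDICT (by name: the statement is the Claim_ definition above) =====
theorem find_max_ralph_pairs_py_spec : Claim_equal_find_max_ralph_pairs_py := by
  intro pairs _
  unfold Spec_find_max_ralph_pairs_py
  rw [pv_A_eq]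
  show _ = pvSearchB pairs (pvNodesB pairs []) pairs.length
  rw [pv_searchB_eq]
  rfl
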